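-- pv_equiv track=rewrite | github.com/Cloolalang/Multi-Channel-Cellular-downlink-signal-power-monitor | dashboard/app/main.py | _pick_hw_from_ati
-- ===== SOURCE A (Python) =====
-- def _clean_modem_id_lines(lines: list[str]) -> list[str]:
--     out: list[str] = []
--     for raw in lines:
--         s = (raw or "").strip()
--         if not s:
--             continue
--         up = s.upper()
--         if up in ("OK", "ERROR"):
--             continue
--         if up.startswith("+CME ERROR") or up.startswith("+CMS ERROR"):
--             continue
--         out.append(s)
--     return out
--
-- def _pick_hw_from_ati(lines: list[str]) -> str | None:
--     cleaned = _clean_modem_id_lines(lines)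
--     if not cleaned:
--         return None
--     for s in cleaned:
--         up = s.upper()
--         if "EC25" in up or "QUECTEL" in up:
--             return s
--     return cleaned[0]
-- ===== SOURCE B (Python) =====
-- def _pick_hw_from_ati(lines: list[str]) -> str | None:
--     first = None
--     for raw in lines:
--         s = (raw or "").strip()
--         if not s:
--             continue
--         up = s.upper()
--         if up in ("OK", "ERROR") or up.startswith("+CME ERROR") or up.startswith("+CMS ERROR"):
--             continue
--         if first is None:
--             first = s
--         if "EC25" in up or "QUECTEL" in up:
--             return s
--     return first
-- ===== Notes on version B (the rewrite author's own statement) =====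
-- stated objective: simpler
-- what changed: Replaces the two-phase clean-then-scan (materializing an intermediate cleaned list, then a second loop plus an indexed fallback) with one streaming pass that tracks the first surviving line in a variable and returns early on a hardware match.
import Mathlib
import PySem

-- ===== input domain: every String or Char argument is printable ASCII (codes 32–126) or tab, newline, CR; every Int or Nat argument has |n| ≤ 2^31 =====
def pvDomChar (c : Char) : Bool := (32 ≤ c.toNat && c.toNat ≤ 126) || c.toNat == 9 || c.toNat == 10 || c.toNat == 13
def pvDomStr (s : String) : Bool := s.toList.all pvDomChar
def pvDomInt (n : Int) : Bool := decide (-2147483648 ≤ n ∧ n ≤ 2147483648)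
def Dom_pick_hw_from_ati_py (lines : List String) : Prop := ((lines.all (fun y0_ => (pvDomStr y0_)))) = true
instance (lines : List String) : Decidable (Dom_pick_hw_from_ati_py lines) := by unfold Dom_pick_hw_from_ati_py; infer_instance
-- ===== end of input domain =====

-- B replaces A's clean-then-scan two-phase pipeline by a single streaming pass
-- tracking the first surviving line; same return value, no intermediate list.


-- ===== PORT A =====
-- _clean_modem_id_lines: out = []; for raw in lines: … out.append(s); return out
def cleanA (lines : List String) : List String :=
  lines.foldl (fun out raw =>
    let s := PySem.Str.strip raw          -- (raw or "").strip(): for str, 'raw or ""' is raw unless "" (same strip)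
    if s == "" then out
    else
      let up := PySem.Str.upper s
      if up == "OK" || up == "ERROR" then out
      else if PySem.Str.startswith up "+CME ERROR" || PySem.Str.startswith up "+CMS ERROR" then out
      else out ++ [s]) []

-- the 'for s in cleaned: if "EC25" in up or "QUECTEL" in up: return s' loop
def scanA : List String → Option String
  | [] => none
  | s :: rest =>
    let up := PySem.Str.upper s
    if PySem.Str.isIn "EC25" up || PySem.Str.isIn "QUECTEL" up then some s
    else scanA rest

def pick_hw_from_ati_py (lines : List String) : Option String :=
  match cleanA lines with
  | [] => none                             -- if not cleaned: return None
  | c0 :: rest =>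
    match scanA (c0 :: rest) with
    | some s => some s                     -- return s
    | none => some c0                      -- return cleaned[0]

-- ===== PORT B =====
def goB (first : Option String) (lines : List String) : Option String :=
  match lines with
  | [] => first                            -- return first
  | raw :: rest =>
    let s := PySem.Str.strip raw
    if s == "" then goB first rest         -- continue
    else
      let up := PySem.Str.upper s
      if up == "OK" || up == "ERROR" || PySem.Str.startswith up "+CME ERROR"
          || PySem.Str.startswith up "+CMS ERROR" then goB first rest   -- continue
      else
        let first' := if first.isNone then some s else first
        if PySem.Str.isIn "EC25" up || PySem.Str.isIn "QUECTEL" up then some s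
        else goB first' rest

def pick_hw_from_ati_py_alt (lines : List String) : Option String := goB none lines

-- ===== PRECONDITION & SPEC =====
def Spec_pick_hw_from_ati_py (lines : List String) (out : Option String) : Prop := out = pick_hw_from_ati_py_alt lines
instance (lines : List String) (out : Option String) : Decidable (Spec_pick_hw_from_ati_py lines out) := by unfold Spec_pick_hw_from_ati_py; infer_instance

-- ===== CLAIM (what is proved, stated in full; the proofs are below) =====
def Claim_equal_pick_hw_from_ati_py : Prop := ∀ (lines : List String), Dom_pick_hw_from_ati_py lines → Spec_pick_hw_from_ati_py lines (pick_hw_from_ati_py lines)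

-- ===== LEMMAS AND PROOFS =====

-- a surviving (kept) stripped line
def keepS (s : String) : Bool :=
  !(s == "" || PySem.Str.upper s == "OK" || PySem.Str.upper s == "ERROR"
    || PySem.Str.startswith (PySem.Str.upper s) "+CME ERROR"
    || PySem.Str.startswith (PySem.Str.upper s) "+CMS ERROR")

-- what A computes from a cleaned list, with B's pending 'first' folded in
def pickFrom (cl : List String) (first : Option String) : Option String :=
  match scanA cl with
  | some s => some s
  | none =>
    match first with
    | some x => some x
    | none => cl.head?

theorem cleanA_spec (lines : List String) (acc : List String) :
    lines.foldl (fun out raw =>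
      let s := PySem.Str.strip raw
      if s == "" then out
      else
        let up := PySem.Str.upper s
        if up == "OK" || up == "ERROR" then out
        else if PySem.Str.startswith up "+CME ERROR" || PySem.Str.startswith up "+CMS ERROR" then out
        else out ++ [s]) acc
    = acc ++ (lines.filter (fun r => keepS (PySem.Str.strip r))).map PySem.Str.strip := by
  induction lines generalizing acc with
  | nil => simp
  | cons r rest ih =>
    simp only [List.foldl_cons, List.filter_cons]
    by_cases hk : keepS (PySem.Str.strip r) = true
    · have hkc := hk
      simp [keepS] at hkc
      have : (let s := PySem.Str.strip r
        if s == "" then acc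
        else
          let up := PySem.Str.upper s
          if up == "OK" || up == "ERROR" then acc
          else if PySem.Str.startswith up "+CME ERROR" || PySem.Str.startswith up "+CMS ERROR" then acc
          else acc ++ [s]) = acc ++ [PySem.Str.strip r] := by
        simp [hkc]
      rw [this, ih, hk]
      simp
    · have : (let s := PySem.Str.strip r
        if s == "" then acc
        else
          let up := PySem.Str.upper s
          if up == "OK" || up == "ERROR" then acc
          else if PySem.Str.startswith up "+CME ERROR" || PySem.Str.startswith up "+CMS ERROR" then acc
          else acc ++ [s]) = acc := by
        dsimp only
        split_ifs with h1 h2 h3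
        · rfl
        · rfl
        · rfl
        · simp at h1 h2 h3
          exact absurd (by simp [keepS, h1, h2, h3]) hk
      rw [this, ih]
      simp [hk]

theorem goB_spec (lines : List String) (first : Option String) :
    goB first lines
      = pickFrom ((lines.filter (fun r => keepS (PySem.Str.strip r))).map PySem.Str.strip) first := by
  induction lines generalizing first with
  | nil => cases first <;> simp [goB, pickFrom, scanA]
  | cons r rest ih =>
    simp only [List.filter_cons]
    by_cases hk : keepS (PySem.Str.strip r) = true
    · have hkeep := hk
      simp [keepS] at hkeep
      rw [hk]
      simp only [List.map_cons]
      by_cases hm : (PySem.Str.isIn "EC25" (PySem.Str.upper (PySem.Str.strip r))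
          || PySem.Str.isIn "QUECTEL" (PySem.Str.upper (PySem.Str.strip r))) = true
      · -- hardware match: both return some (strip r)
        simp at hm
        simp [goB, pickFrom, scanA, hm, hkeep]
      · -- survivor, no match
        simp at hm
        have hgo : goB first (r :: rest)
            = goB (if first.isNone then some (PySem.Str.strip r) else first) rest := by
          simp [goB, hm, hkeep]
        rw [hgo, ih]
        cases hscan : scanA ((rest.filter (fun r => keepS (PySem.Str.strip r))).map PySem.Str.strip) with
        | some t => cases first <;> simp [pickFrom, scanA, hscan, hm, hkeep]
        | none => cases first <;> simp [pickFrom, scanA, hscan, hm, hkeep]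
    · have hkeep : ¬ keepS (PySem.Str.strip r) = true := hk
      simp only [Bool.not_eq_true] at hkeep
      rw [hkeep]
      have hdrop := hk
      simp only [keepS, Bool.not_eq_true, Bool.not_eq_false', Bool.or_eq_true_iff] at hdrop
      have hgo : goB first (r :: rest) = goB first rest := by
        by_cases h0 : PySem.Str.strip r = ""
        · simp [goB, h0]
        · rcases hdrop with ((((h|h)|h)|h)|h)
          · exact absurd (by simpa using h) h0
          all_goals (try simp at h); all_goals simp [goB, h0, h]
      rw [hgo, ih, if_neg (by simp [hkeep])]

-- ===== VERDICT (by name: the statement is the Claim_ definition above) =====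
theorem pick_hw_from_ati_py_spec : Claim_equal_pick_hw_from_ati_py := by
  intro lines _
  unfold Spec_pick_hw_from_ati_py pick_hw_from_ati_py pick_hw_from_ati_py_alt
  rw [goB_spec]
  have hclean : cleanA lines
      = (lines.filter (fun r => keepS (PySem.Str.strip r))).map PySem.Str.strip := by
    unfold cleanA; rw [cleanA_spec]; rfl
  rw [hclean]
  cases hcl : (lines.filter (fun r => keepS (PySem.Str.strip r))).map PySem.Str.strip with
  | nil => simp [pickFrom, scanA]
  | cons c0 cl' =>
    cases hscan : scanA (c0 :: cl') with
    | some s => simp [pickFrom, hscan]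
    | none => simp [pickFrom, hscan]
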